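-- pv_equiv track=rewrite | github.com/ITrackU/telcom-tech-plot | ethernet_encode/1_GB_ethernet_8b10b_encoding.py | chunk_bits
-- ===== SOURCE A (Python) =====
-- def chunk_bits(bits, size=8):
--     """Chunk bitstream into 8-bit bytes, pad last with 0s if needed."""
--     chunks = []
--     for i in range(0, len(bits), size):
--         chunk = bits[i:i+size]
--         if len(chunk) < size:
--             chunk += [0] * (size - len(chunk))
--         chunks.append(chunk)
--     return chunks
-- ===== SOURCE B (Python) =====
-- def chunk_bits(bits, size=8):
--     """Chunk bitstream into size-bit blocks, pad last with 0s if needed.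
--
--     Single pass over the elements with an accumulator: grow the current
--     chunk one bit at a time, flush it when full, pad the leftover at the
--     end. No index arithmetic or slicing."""
--     if size <= 0:
--         return []
--     chunks = []
--     cur = []
--     for b in bits:
--         cur.append(b)
--         if len(cur) == size:
--             chunks.append(cur)
--             cur = []
--     if cur:
--         chunks.append(cur + [0] * (size - len(cur)))
--     return chunks
-- ===== Notes on version B (the rewrite author's own statement) =====
-- stated objective: alternative
-- what changed: B replaces A's stride-indexed slicing loop (range(0,len,size) + bits[i:i+size] + pad-the-short-slice) with a single element-wise pass that accumulates the current chunk, flushes it when it reaches size, and pads the leftover once at the end; no indices or slices at all.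
import Mathlib
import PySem

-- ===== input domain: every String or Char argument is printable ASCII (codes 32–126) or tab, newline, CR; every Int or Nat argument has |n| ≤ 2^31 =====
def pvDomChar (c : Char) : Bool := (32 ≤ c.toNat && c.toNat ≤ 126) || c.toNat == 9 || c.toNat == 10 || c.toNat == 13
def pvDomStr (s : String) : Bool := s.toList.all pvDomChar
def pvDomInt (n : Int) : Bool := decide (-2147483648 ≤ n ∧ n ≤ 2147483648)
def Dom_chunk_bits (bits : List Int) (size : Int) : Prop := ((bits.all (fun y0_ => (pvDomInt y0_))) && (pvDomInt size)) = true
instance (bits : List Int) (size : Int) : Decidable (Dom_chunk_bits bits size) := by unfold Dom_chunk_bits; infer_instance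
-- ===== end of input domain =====

-- B replaces A's stride-indexed slicing loop with a single element-wise pass that
-- accumulates the current chunk, flushes it when full and pads the leftover at the end.

-- ===== PORT A =====
-- loop body of A: chunk = bits[i:i+size]; if len(chunk) < size: chunk += [0]*(size-len(chunk))
def chunkBodyA (bits : List Int) (size i : Int) : List Int :=
  let chunk := PySem.List.slice bits (some i) (some (i + size))
  if (chunk.length : Int) < size then
    chunk ++ List.replicate (size - (chunk.length : Int)).toNat 0
  else chunk

def chunk_bits (bits : List Int) (size : Int) : List (List Int) :=
  (PySem.List.pyRange 0 (PySem.List.len bits) size).foldl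
    (fun chunks i => chunks ++ [chunkBodyA bits size i]) []

-- ===== PORT B =====
-- loop body of B: cur.append(b); if len(cur) == size: chunks.append(cur); cur = []
def stepB (size : Int) (st : List (List Int) × List Int) (b : Int) :
    List (List Int) × List Int :=
  let cur := st.2 ++ [b]
  if (cur.length : Int) = size then (st.1 ++ [cur], ([] : List Int)) else (st.1, cur)

-- epilogue of B: if cur: chunks.append(cur + [0] * (size - len(cur)))
def finishB (size : Int) (st : List (List Int) × List Int) : List (List Int) :=
  if st.2 ≠ [] then st.1 ++ [st.2 ++ List.replicate (size - (st.2.length : Int)).toNat 0]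
  else st.1

def chunk_bits_alt (bits : List Int) (size : Int) : List (List Int) :=
  if size ≤ 0 then []
  else finishB size (bits.foldl (stepB size) ([], []))

-- ===== PRECONDITION & SPEC =====
-- Pre_ excludes only size = 0, where Python A raises ValueError (range() arg 3 must not be zero).
def Pre_chunk_bits (bits : List Int) (size : Int) : Prop := size ≠ 0
instance (bits : List Int) (size : Int) : Decidable (Pre_chunk_bits bits size) := by unfold Pre_chunk_bits; infer_instance
def pvWitness_chunk_bits : List Int × Int := ([1, 0, 1, 1, 0], 2)

def Spec_chunk_bits (bits : List Int) (size : Int) (out : List (List Int)) : Prop := out = chunk_bits_alt bits size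
instance (bits : List Int) (size : Int) (out : List (List Int)) : Decidable (Spec_chunk_bits bits size out) := by unfold Spec_chunk_bits; infer_instance

-- ===== CLAIM (what is proved, stated in full; the proofs are below) =====
def Claim_equal_chunk_bits : Prop := ∀ (bits : List Int) (size : Int), Dom_chunk_bits bits size → Pre_chunk_bits bits size → Spec_chunk_bits bits size (chunk_bits bits size)

-- ===== LEMMAS AND PROOFS =====

-- common reference shape: chunk the list front-to-back, padding the (short) last block
def padChunks (S : Nat) : List Int → List (List Int)
  | [] => []
  | b :: t =>
      (List.take S (b :: t) ++ List.replicate (S - (List.take S (b :: t)).length) 0)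
        :: padChunks S (List.drop (S - 1) t)
  termination_by l => l.length
  decreasing_by simp

theorem padChunks_nil (S : Nat) : padChunks S [] = [] := by
  rw [padChunks]

theorem padChunks_cons (S : Nat) (hS0 : 0 < S) (l : List Int) (h : l ≠ []) :
    padChunks S l
      = (l.take S ++ List.replicate (S - (l.take S).length) 0) :: padChunks S (l.drop S) := by
  obtain ⟨S', rfl⟩ : ∃ S', S = S' + 1 := ⟨S - 1, by omega⟩
  cases l with
  | nil => exact absurd rfl h
  | cons b t => rw [padChunks]; congr 2
theorem pv_fold_acc (size : Int) (l : List Int) (acc : List (List Int)) (cur : List Int) :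
    l.foldl (stepB size) (acc, cur)
      = (acc ++ (l.foldl (stepB size) ([], cur)).1, (l.foldl (stepB size) ([], cur)).2) := by
  induction l generalizing acc cur with
  | nil => simp
  | cons b t ih =>
    simp only [List.foldl_cons, stepB, List.nil_append]
    split_ifs with h
    · rw [ih (acc ++ [cur ++ [b]]) [], ih [cur ++ [b]] []]
      simp
    · exact ih acc (cur ++ [b])

theorem finishB_acc (size : Int) (acc : List (List Int)) (st : List (List Int) × List Int) :
    finishB size (acc ++ st.1, st.2) = acc ++ finishB size st := by
  unfold finishB; split_ifs <;> simp
theorem pv_B_inv (S : Nat) (hS0 : 0 < S) (l : List Int) :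
    ∀ (cur : List Int), cur.length < S →
      finishB (S : Int) (l.foldl (stepB (S : Int)) ([], cur)) = padChunks S (cur ++ l) := by
  induction l with
  | nil =>
    intro cur hcur
    simp only [List.foldl_nil, List.append_nil]
    cases cur with
    | nil => simp [finishB, padChunks_nil]
    | cons c cs =>
      unfold finishB
      rw [if_pos (by simp)]
      rw [padChunks_cons S hS0 _ (by simp)]
      have h1 : List.take S (c :: cs) = c :: cs := List.take_of_length_le (by omega)
      have h2 : List.drop S (c :: cs) = [] := List.drop_eq_nil_of_le (by omega)
      have h3 : ((S : Int) - (((c :: cs) : List Int).length : Int)).toNat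
          = S - (c :: cs).length := by omega
      rw [h1, h2, h3, padChunks_nil]
      simp
  | cons b t ih =>
    intro cur hcur
    simp only [List.foldl_cons, stepB, List.nil_append]
    split_ifs with h
    · have hlen : (cur ++ [b]).length = S := by exact_mod_cast h
      have hemp : ([] : List Int).length < S := by simpa using hS0
      rw [pv_fold_acc, finishB_acc, ih [] hemp]
      have hl : cur ++ b :: t = (cur ++ [b]) ++ t := by simp
      have hne : (cur ++ [b]) ++ t ≠ [] := by
        intro he; have := congrArg List.length he; simp at this
      rw [hl, padChunks_cons S hS0 _ hne]
      have hge : S ≤ (cur ++ [b]).length := le_of_eq hlen.symm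
      rw [List.take_append_of_le_length hge, List.take_of_length_le (le_of_eq hlen),
          List.drop_append_of_le_length hge, List.drop_eq_nil_of_le (le_of_eq hlen)]
      simp [hlen]
    · have hlt : (cur ++ [b]).length < S := by
        have h' : (cur ++ [b]).length ≠ S := fun e => h (by exact_mod_cast e)
        simp at h' ⊢
        omega
      rw [ih (cur ++ [b]) hlt]
      congr 1
      simp
theorem chunkBodyA_zero (bits : List Int) (S : Nat) :
    chunkBodyA bits (S : Int) 0
      = bits.take S ++ List.replicate (S - (bits.take S).length) 0 := by
  unfold chunkBodyA
  rw [PySem.List.slice_toNat bits (by omega) (by omega)]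
  simp only [zero_add, List.drop_zero, Int.toNat_natCast, Int.toNat_zero, Nat.sub_zero]
  have hlen : (bits.take S).length ≤ S := by simp
  split_ifs with h
  · congr 2
    omega
  · have he : (bits.take S).length = S := by omega
    rw [he]
    simp

-- A's loop body at a later block start shifts to the dropped list
theorem chunkBodyA_shift (bits : List Int) (S k : Nat) :
    chunkBodyA bits (S : Int) ((S : Int) * ((k : Int) + 1))
      = chunkBodyA (bits.drop S) (S : Int) ((S : Int) * (k : Int)) := by
  unfold chunkBodyA
  have e2 : (S : Int) * ((k : Int) + 1) + (S : Int) = ((S * k + S + S : Nat) : Int) := by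
    push_cast; ring
  have e1 : (S : Int) * ((k : Int) + 1) = ((S * k + S : Nat) : Int) := by push_cast; ring
  have e4 : (S : Int) * (k : Int) + (S : Int) = ((S * k + S : Nat) : Int) := by push_cast; ring
  have e3 : (S : Int) * (k : Int) = ((S * k : Nat) : Int) := by push_cast; ring
  rw [e2, e1, e4, e3,
      PySem.List.slice_toNat bits (by positivity) (by positivity),
      PySem.List.slice_toNat (bits.drop S) (by positivity) (by positivity)]
  simp only [Int.toNat_natCast]
  rw [List.drop_drop]
  have h1 : S * k + S + S - (S * k + S) = S := by omega
  have h2 : S * k + S - S * k = S := by omega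
  rw [h1, h2, Nat.add_comm S (S * k)]

-- map over the block indices equals the recursive chunking
theorem pv_map_eq (S : Nat) (hS0 : 0 < S) :
    ∀ (m : Nat) (bits : List Int), bits.length ≤ m →
      (List.range ((bits.length + S - 1) / S)).map
          (fun (k : Nat) => chunkBodyA bits (S : Int) ((S : Int) * (k : Int)))
        = padChunks S bits := by
  intro m
  induction m with
  | zero =>
    intro bits h
    have hb : bits = [] := List.eq_nil_of_length_eq_zero (by omega)
    subst hb
    have hz : (S - 1) / S = 0 := Nat.div_eq_of_lt (by omega)
    simp [padChunks_nil, hz]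
  | succ m ih =>
    intro bits h
    cases bits with
    | nil =>
      have hz : (S - 1) / S = 0 := Nat.div_eq_of_lt (by omega)
      simp [padChunks_nil, hz]
    | cons b t =>
      have hL1 : 1 ≤ (b :: t).length := by simp
      have hcnt : ((b :: t).length + S - 1) / S = (((b :: t).drop S).length + S - 1) / S + 1 := by
        rw [List.length_drop]
        by_cases hc : S < (b :: t).length
        · have e : (b :: t).length + S - 1 = ((b :: t).length - S + S - 1) + S := by omega
          rw [e, Nat.add_div_right _ hS0]
        · have e : (b :: t).length + S - 1 = ((b :: t).length - 1) + S := by omega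
          have h1 : (b :: t).length - 1 < S := by omega
          have h2 : (b :: t).length - S = 0 := by omega
          have h3 : 0 + S - 1 < S := by omega
          rw [e, Nat.add_div_right _ hS0, Nat.div_eq_of_lt h1, h2, Nat.div_eq_of_lt h3]
      rw [hcnt, List.range_succ_eq_map, List.map_cons, List.map_map]
      rw [padChunks_cons S hS0 (b :: t) (by simp)]
      congr 1
      · have e0 : (S : Int) * ((0 : Nat) : Int) = 0 := by push_cast; ring
        rw [e0, chunkBodyA_zero]
      · have hmap : ∀ k ∈ List.range ((((b :: t).drop S).length + S - 1) / S),
            ((fun (k : Nat) => chunkBodyA (b :: t) (S : Int) ((S : Int) * (k : Int))) ∘ Nat.succ) k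
              = chunkBodyA ((b :: t).drop S) (S : Int) ((S : Int) * (k : Int)) := by
          intro k _
          simp only [Function.comp_apply]
          have hc : ((Nat.succ k : Nat) : Int) = (k : Int) + 1 := by push_cast; ring
          rw [hc]
          exact chunkBodyA_shift (b :: t) S k
        rw [List.map_congr_left hmap]
        have hle : ((b :: t).drop S).length ≤ m := by
          rw [List.length_drop]
          have h' := h
          simp only [List.length_cons] at h' ⊢
          omega
        exact ih ((b :: t).drop S) hle

theorem pv_pos_case (bits : List Int) (size : Int) (hs : 0 < size) :
    chunk_bits bits size = chunk_bits_alt bits size := by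
  obtain ⟨S, rfl⟩ : ∃ S : Nat, (S : Int) = size :=
    ⟨size.toNat, Int.toNat_of_nonneg (le_of_lt hs)⟩
  have hS0 : 0 < S := by exact_mod_cast hs
  have hB : chunk_bits_alt bits (S : Int) = padChunks S bits := by
    unfold chunk_bits_alt
    rw [if_neg (by omega : ¬ ((S : Int) ≤ 0))]
    simpa using pv_B_inv S hS0 bits [] (by simpa using hS0)
  unfold chunk_bits
  rw [PySem.List.foldl_append_singleton_eq_map, List.nil_append]
  simp only [PySem.List.len_eq]
  rw [PySem.List.pyRange_of_pos _ _ hs, hB]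
  by_cases hpos : 0 < (bits.length : Int)
  · rw [if_pos hpos, List.map_map]
    have hcnt : (((bits.length : Int) - 0 + (S : Int) - 1) / (S : Int)).toNat
        = (bits.length + S - 1) / S := by
      have e : (bits.length : Int) - 0 + (S : Int) - 1
          = ((bits.length + S - 1 : Nat) : Int) := by push_cast; omega
      rw [e, ← Int.natCast_div, Int.toNat_natCast]
    rw [hcnt, ← pv_map_eq S hS0 bits.length bits le_rfl]
    apply List.map_congr_left
    intro k _
    simp [Function.comp]
  · rw [if_neg hpos]
    have hb : bits = [] := List.eq_nil_of_length_eq_zero (by omega)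
    subst hb
    rw [padChunks_nil]
    simp

theorem pv_neg_case (bits : List Int) (size : Int) (hs : size < 0) :
    chunk_bits bits size = chunk_bits_alt bits size := by
  have h1 : chunk_bits_alt bits size = [] := by
    unfold chunk_bits_alt; rw [if_pos (le_of_lt hs)]
  have h2 : PySem.List.pyRange 0 (PySem.List.len bits) size = [] := by
    rw [PySem.List.pyRange_of_neg _ _ hs]
    have : ¬ (PySem.List.len bits < 0) := by simp [PySem.List.len_eq]
    rw [if_neg this]; simp
  unfold chunk_bits; rw [h2, h1]; rfl

-- ===== VERDICT (by name: the statement is the Claim_ definition above) =====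
theorem chunk_bits_spec : Claim_equal_chunk_bits := by
  intro bits size _ hpre
  unfold Spec_chunk_bits
  rcases lt_or_gt_of_ne hpre with h | h
  · exact pv_neg_case bits size h
  · exact pv_pos_case bits size h
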